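-- pv_equiv track=rewrite | github.com/cosmicRover/algoGrind | array-strings_stacks/ReduceByK.py | helper
-- ===== SOURCE A (Python) =====
-- def helper(sum, k):
--
--     #group the sum
--     count = 0
--     group = []
--
--     while count <len(sum):
--         val = sum[count:count+k]
--         count += k
--
--         #get the total
--         total = 0
--         for x in val:
--             total += int(x)
--
--         group.append(total)
--
--     # run recursively if needed more
--     if len(group) > k:
--         return helper(group, k)
--
--     return group
-- ===== SOURCE B (Python) =====
-- def helper(sum, k):
--     cur = sum
--     while True:
--         group = []
--         acc = 0
--         cnt = 0
--         for x in cur: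
--             acc += int(x)
--             cnt += 1
--             if cnt == k:
--                 group.append(acc)
--                 acc = 0
--                 cnt = 0
--         if cnt != 0:
--             group.append(acc)
--         if len(group) <= k:
--             return group
--         cur = group
-- ===== Notes on version B (the rewrite author's own statement) =====
-- stated objective: alternative
-- what changed: Replaces A's slice-and-recurse grouping with an iterative outer loop whose inner pass is a single fold over the list carrying (accumulator, counter), so no slices are materialised and no Python recursion is used.
import Mathlib
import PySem

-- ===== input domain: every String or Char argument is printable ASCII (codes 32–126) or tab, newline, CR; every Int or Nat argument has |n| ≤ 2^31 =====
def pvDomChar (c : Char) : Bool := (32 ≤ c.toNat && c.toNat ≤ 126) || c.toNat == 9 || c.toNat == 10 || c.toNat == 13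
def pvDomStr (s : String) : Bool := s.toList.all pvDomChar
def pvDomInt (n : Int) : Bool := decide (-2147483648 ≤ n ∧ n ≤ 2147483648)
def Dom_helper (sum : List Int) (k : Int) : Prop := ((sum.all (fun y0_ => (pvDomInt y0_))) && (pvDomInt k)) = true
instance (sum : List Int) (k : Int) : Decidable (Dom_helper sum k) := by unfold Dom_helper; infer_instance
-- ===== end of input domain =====

-- B replaces A's slice-and-recurse grouping by an iterative outer loop whose inner pass is one
-- fold carrying (accumulator, counter); same return value on all inputs where A terminates.

-- ===== PORT A =====
-- A's inner 'while count < len(sum)' loop: slices val = sum[count:count+k], sums val with a for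
-- loop, appends, count += k.  Fuel makes the loop total in Lean; under Pre_helper (k ≥ 1 on a
-- nonempty list) sum.length + 1 iterations always suffice, so the port is exact there.
def helperGroupLoop (s : List Int) (k : Int) (count : Int) (group : List Int) : Nat → List Int
  | 0 => group
  | fuel + 1 =>
    if count < (s.length : Int) then
      let val := PySem.List.slice s (some count) (some (count + k))
      let total := val.foldl (fun t x => t + x) 0
      helperGroupLoop s k (count + k) (group ++ [total]) fuel
    else group

-- A's recursion 'if len(group) > k: return helper(group, k)', again made total by fuel; under
-- Pre_helper the group length strictly decreases each round, so sum.length + 1 rounds suffice.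
def helperFuel (k : Int) : Nat → List Int → List Int
  | 0, _ => []
  | fuel + 1, s =>
    let group := helperGroupLoop s k 0 [] (s.length + 1)
    if (group.length : Int) > k then helperFuel k fuel group else group

def helper (sum : List Int) (k : Int) : List Int :=
  helperFuel k (sum.length + 1) sum

-- ===== PORT B =====
-- one pass over cur: acc += x; cnt += 1; if cnt == k flush acc into group
def helperAltPass (cur : List Int) (k : Int) : List Int :=
  let st := cur.foldl
    (fun (st : List Int × Int × Int) x =>
      let acc := st.2.1 + x
      let cnt := st.2.2 + 1
      if cnt == k then (st.1 ++ [acc], 0, 0) else (st.1, acc, cnt))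
    ([], 0, 0)
  if st.2.2 ≠ 0 then st.1 ++ [st.2.1] else st.1

-- B's 'while True' outer loop, made total by fuel exactly as A's port
def helperAltLoop (k : Int) : Nat → List Int → List Int
  | 0, _ => []
  | fuel + 1, cur =>
    let group := helperAltPass cur k
    if (group.length : Int) ≤ k then group else helperAltLoop k fuel group

def helper_alt (sum : List Int) (k : Int) : List Int :=
  helperAltLoop k (sum.length + 1) sum

-- ===== PRECONDITION & SPEC =====
-- Pre_ excludes exactly the inputs where the Python A never returns: k ≤ 0 with a nonempty list
-- loops forever (count += k never advances), k = 1 with length ≥ 2 and [] with k < 0 recurse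
-- forever (RecursionError); k = 1 with length ≤ 1 and [] with k = 0 do return and are admitted.
def Pre_helper (sum : List Int) (k : Int) : Prop :=
  2 ≤ k ∨ (k = 1 ∧ sum.length ≤ 1) ∨ (sum = [] ∧ k = 0)
instance (sum : List Int) (k : Int) : Decidable (Pre_helper sum k) := by
  unfold Pre_helper; infer_instance
def pvWitness_helper : List Int × Int := ([3, 1, 4, 1, 5], 2)

def Spec_helper (sum : List Int) (k : Int) (out : List Int) : Prop := out = helper_alt sum k
instance (sum : List Int) (k : Int) (out : List Int) : Decidable (Spec_helper sum k out) := by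
  unfold Spec_helper; infer_instance

-- ===== CLAIM (what is proved, stated in full; the proofs are below) =====
def Claim_equal_helper : Prop :=
  ∀ (sum : List Int) (k : Int), Dom_helper sum k → Pre_helper sum k → Spec_helper sum k (helper sum k)

-- ===== LEMMAS AND PROOFS =====

-- common normal form: sums of consecutive chunks of max 1 m elements (max only for totality;
-- every use has 1 ≤ m)
def chunkSums (m : Nat) : List Int → List Int
  | [] => []
  | x :: t =>
    ((x :: t).take (max 1 m)).foldl (fun t x => t + x) 0 :: chunkSums m ((x :: t).drop (max 1 m))
  termination_by s => s.length
  decreasing_by simp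

theorem chunkSums_nil (m : Nat) : chunkSums m [] = [] := by
  conv_lhs => unfold chunkSums

theorem chunkSums_cons (m : Nat) (hm : 1 ≤ m) (x : Int) (t : List Int) :
    chunkSums m (x :: t) =
      ((x :: t).take m).foldl (fun t x => t + x) 0 :: chunkSums m ((x :: t).drop m) := by
  have h : max 1 m = m := by omega
  conv_lhs => unfold chunkSums
  rw [h]

-- A's grouping loop computes the chunk sums of the un-consumed suffix
theorem helperGroupLoop_eq (s : List Int) (k : Int) (hk : 1 ≤ k) :
    ∀ (fuel : Nat) (count : Int) (group : List Int),
      0 ≤ count → s.length - count.toNat < fuel →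
      helperGroupLoop s k count group fuel = group ++ chunkSums k.toNat (s.drop count.toNat) := by
  intro fuel
  induction fuel with
  | zero => intro count group _ h; omega
  | succ fuel ih =>
    intro count group hc hfuel
    by_cases hlt : count < (s.length : Int)
    · have hdrop : s.drop count.toNat ≠ [] := by
        intro h
        have := List.drop_eq_nil_iff.mp h
        omega
      obtain ⟨y, t, hyt⟩ := List.exists_cons_of_ne_nil hdrop
      have hcc : (count + k).toNat = count.toNat + k.toNat := by omega
      rw [helperGroupLoop]
      simp only [hlt, if_pos]
      rw [PySem.List.slice_toNat s hc (by omega), hcc,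
          ih (count + k) _ (by omega) (by omega), hcc, ← List.drop_drop]
      rw [show s.drop count.toNat = y :: t from hyt, chunkSums_cons k.toNat (by omega)]
      simp [List.append_assoc]
    · rw [helperGroupLoop]
      simp only [hlt, ite_false]
      have h0 : s.drop count.toNat = [] := by
        apply List.drop_eq_nil_iff.mpr; omega
      simp [h0, chunkSums_nil]

theorem sumFoldl_shift (b : List Int) (c d : Int) :
    b.foldl (fun t x => t + x) (c + d) = c + b.foldl (fun t x => t + x) d := by
  induction b generalizing d with
  | nil => rfl
  | cons y u ih => simp only [List.foldl]; rw [add_assoc]; exact ih (d + y)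

-- fold step over a full chunk: exactly k elements flush the accumulator
theorem altFold_full (k : Int) :
    ∀ (a : List Int) (g : List Int) (acc cnt : Int),
      0 ≤ cnt → cnt + (a.length : Int) = k → a ≠ [] →
      a.foldl
        (fun (st : List Int × Int × Int) x =>
          let acc := st.2.1 + x
          let cnt := st.2.2 + 1
          if cnt == k then (st.1 ++ [acc], 0, 0) else (st.1, acc, cnt))
        (g, acc, cnt)
      = (g ++ [acc + a.foldl (fun t x => t + x) 0], 0, 0) := by
  intro a
  induction a with
  | nil => intro g acc cnt _ _ hne; exact absurd rfl hne
  | cons x t ih =>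
    intro g acc cnt hc hlen _
    simp only [List.length_cons] at hlen
    by_cases hend : t = []
    · subst hend
      have hck : cnt + 1 = k := by simp at hlen; omega
      simp [List.foldl, hck]
    · have hlt : cnt + 1 ≠ k := by
        have : 0 < t.length := List.length_pos_iff.mpr hend
        omega
      simp only [List.foldl]
      rw [if_neg (by simpa using hlt)]
      rw [ih g (acc + x) (cnt + 1) (by omega) (by omega) hend]
      have h2 : t.foldl (fun t x => t + x) (0 + x) = x + t.foldl (fun t x => t + x) 0 := by
        rw [show (0:Int) + x = x + 0 by ring]; exact sumFoldl_shift t x 0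
      have hv : acc + x + t.foldl (fun t x => t + x) 0
          = acc + (x :: t).foldl (fun t x => t + x) 0 := by
        simp only [List.foldl]; rw [h2]; ring
      rw [hv]
      simp only [List.foldl]

-- fold over a short remainder: fewer than k more elements only accumulate
theorem altFold_short (k : Int) :
    ∀ (a : List Int) (g : List Int) (acc cnt : Int),
      0 ≤ cnt → cnt + (a.length : Int) < k →
      a.foldl
        (fun (st : List Int × Int × Int) x =>
          let acc := st.2.1 + x
          let cnt := st.2.2 + 1
          if cnt == k then (st.1 ++ [acc], 0, 0) else (st.1, acc, cnt))
        (g, acc, cnt)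
      = (g, acc + a.foldl (fun t x => t + x) 0, cnt + a.length) := by
  intro a
  induction a with
  | nil => intro g acc cnt _ _; simp
  | cons x t ih =>
    intro g acc cnt hc hlen
    simp only [List.length_cons] at hlen
    simp only [List.foldl]
    rw [if_neg (by simp only [beq_iff_eq]; omega)]
    rw [ih g (acc + x) (cnt + 1) (by omega) (by omega)]
    have h2 : t.foldl (fun t x => t + x) (0 + x) = x + t.foldl (fun t x => t + x) 0 := by
      rw [show (0:Int) + x = x + 0 by ring]; exact sumFoldl_shift t x 0
    have hv : acc + x + t.foldl (fun t x => t + x) 0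
        = acc + (x :: t).foldl (fun t x => t + x) 0 := by
      simp only [List.foldl]; rw [h2]; ring
    have hl : cnt + 1 + (t.length : Int) = cnt + ((x :: t).length : Int) := by
      simp only [List.length_cons]; push_cast; ring
    rw [hv, hl]
    simp only [List.foldl]

-- the fold only ever appends to the group component
theorem altFold_prefix (k : Int) :
    ∀ (a : List Int) (g : List Int) (acc cnt : Int),
      a.foldl
        (fun (st : List Int × Int × Int) x =>
          let acc := st.2.1 + x
          let cnt := st.2.2 + 1
          if cnt == k then (st.1 ++ [acc], 0, 0) else (st.1, acc, cnt))
        (g, acc, cnt)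
      = (g ++ (a.foldl
          (fun (st : List Int × Int × Int) x =>
            let acc := st.2.1 + x
            let cnt := st.2.2 + 1
            if cnt == k then (st.1 ++ [acc], 0, 0) else (st.1, acc, cnt))
          ([], acc, cnt)).1,
         (a.foldl
          (fun (st : List Int × Int × Int) x =>
            let acc := st.2.1 + x
            let cnt := st.2.2 + 1
            if cnt == k then (st.1 ++ [acc], 0, 0) else (st.1, acc, cnt))
          ([], acc, cnt)).2) := by
  intro a
  induction a with
  | nil => intro g acc cnt; simp
  | cons x t ih =>
    intro g acc cnt
    simp only [List.foldl]
    by_cases h : (cnt + 1 == k) = true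
    · simp only [h, if_pos]
      rw [ih (g ++ [acc + x]), ih ([] ++ [acc + x])]
      simp [List.append_assoc]
    · simp only [h, ite_false]
      exact ih g (acc + x) (cnt + 1)

-- B's pass equals the chunk sums, for k ≥ 1, by strong induction peeling one chunk
theorem helperAltPass_eq (k : Int) (hk : 1 ≤ k) :
    ∀ (s : List Int), helperAltPass s k = chunkSums k.toNat s := by
  intro s
  induction hn : s.length using Nat.strong_induction_on generalizing s with
  | _ n ih =>
    match s with
    | [] => simp [helperAltPass, chunkSums_nil]
    | x :: t =>
      by_cases hlong : k ≤ ((x :: t).length : Int)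
      · -- full first chunk
        have hn' : t.length + 1 = n := by simpa using hn
        have hl2 : k ≤ (t.length : Int) + 1 := by simpa using hlong
        have htk : ((x :: t).take k.toNat).length = k.toNat := by
          simp; omega
        have hsplit : x :: t = (x :: t).take k.toNat ++ (x :: t).drop k.toNat :=
          (List.take_append_drop _ _).symm
        unfold helperAltPass
        rw [chunkSums_cons k.toNat (by omega)]
        conv_lhs => rw [hsplit]
        rw [List.foldl_append]
        rw [altFold_full k _ [] 0 0 le_rfl (by rw [htk]; omega)
            (by intro h; have := congrArg List.length h; simp [htk] at this; omega)]
        rw [altFold_prefix]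
        have hrec := ih ((x :: t).drop k.toNat).length
          (by simp only [List.length_drop, List.length_cons]; omega) ((x :: t).drop k.toNat) rfl
        unfold helperAltPass at hrec
        simp only [zero_add] at *
        rw [← hrec]
        split_ifs with hz
        · simp [List.append_assoc]
        · simp [List.append_assoc]
      · -- short list: one leftover chunk
        have hshort : ((x :: t).length : Int) < k := by omega
        have hs' : (t.length : Int) + 1 < k := by simpa using hshort
        unfold helperAltPass
        rw [altFold_short k _ [] 0 0 le_rfl (by simpa using hshort)]
        have htake : (x :: t).take k.toNat = x :: t := by
          apply List.take_of_length_le; simp only [List.length_cons]; omega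
        have hdrop : (x :: t).drop k.toNat = [] := by
          apply List.drop_eq_nil_iff.mpr; simp only [List.length_cons]; omega
        rw [chunkSums_cons k.toNat (by omega), htake, hdrop, chunkSums_nil]
        simp only [List.length_cons]
        rw [if_pos (by omega)]
        simp

-- the two outer loops agree for every fuel once both passes compute chunk sums
theorem loops_eq (k : Int) (hk : 1 ≤ k) :
    ∀ (fuel : Nat) (s : List Int), helperFuel k fuel s = helperAltLoop k fuel s := by
  intro fuel
  induction fuel with
  | zero => intro s; rfl
  | succ fuel ih =>
    intro s
    rw [helperFuel, helperAltLoop]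
    have hpass : helperGroupLoop s k 0 [] (s.length + 1) = helperAltPass s k := by
      rw [helperGroupLoop_eq s k hk (s.length + 1) 0 [] le_rfl (by simp),
          helperAltPass_eq k hk]
      simp
    rw [hpass]
    by_cases h : ((helperAltPass s k).length : Int) > k
    · rw [if_pos h, if_neg (by omega), ih]
    · rw [if_neg h, if_pos (by omega)]

-- ===== VERDICT (by name: the statement is the Claim_ definition above) =====
theorem helper_spec : Claim_equal_helper := by
  intro sum k _ hpre
  unfold Spec_helper helper helper_alt
  rcases hpre with h2 | ⟨h1, _⟩ | ⟨hnil, h0⟩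
  · exact loops_eq k (by omega) _ sum
  · exact loops_eq k (by omega) _ sum
  · subst hnil; subst h0; rfl
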